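-- pv_equiv track=rewrite | github.com/DavideFasolo/HTG | Test/prove/aprifiles.py | hole_matrix
-- ===== SOURCE A (Python) =====
-- def hole_matrix(li):
--     fori_group = list()
--     num_hole = 0
--     act_diam = 0
--     diam_count = 0
--     for something in li:
--         if num_hole == 0:
--             act_diam = something[0]
--             num_hole += 1
--             fori_group.append([act_diam, [[num_hole, something[1]]]])
--         else:
--             if act_diam == something[0]:
--                 num_hole += 1
--                 fori_group[diam_count][1].append([num_hole, something[1]])
--             else:
--                 act_diam = something[0]
--                 num_hole += 1
--                 fori_group.append([act_diam, [[num_hole, something[1]]]])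
--                 diam_count += 1
--     return fori_group
-- ===== SOURCE B (Python) =====
-- def hole_matrix(li):
--     res = []
--     n = 0
--     rest = li
--     while rest:
--         d = rest[0][0]
--         k = 0
--         while k < len(rest) and rest[k][0] == d:
--             k += 1
--         grp, rest = rest[:k], rest[k:]
--         res.append([d, [[n + i + 1, x[1]] for i, x in enumerate(grp)]])
--         n += k
--     return res
-- ===== Notes on version B (the rewrite author's own statement) =====
-- stated objective: alternative
-- what changed: A's one-pass state machine (num_hole/act_diam/diam_count with in-place append at a tracked index) is replaced by a two-level run-splitting loop: peel off each maximal run of equal diameters, number it with an enumerate comprehension against one global counter, and append the finished group.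
import Mathlib
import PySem

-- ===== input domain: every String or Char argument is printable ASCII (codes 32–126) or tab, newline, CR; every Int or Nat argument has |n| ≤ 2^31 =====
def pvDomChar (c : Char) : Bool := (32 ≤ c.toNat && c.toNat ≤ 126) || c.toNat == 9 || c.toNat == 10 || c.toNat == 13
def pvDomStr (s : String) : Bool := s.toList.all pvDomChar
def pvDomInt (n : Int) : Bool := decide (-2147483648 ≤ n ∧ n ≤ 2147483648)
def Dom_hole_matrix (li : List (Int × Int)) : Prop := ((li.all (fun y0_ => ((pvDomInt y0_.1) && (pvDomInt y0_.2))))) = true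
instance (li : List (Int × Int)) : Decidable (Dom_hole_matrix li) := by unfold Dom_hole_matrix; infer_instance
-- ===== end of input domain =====

-- B replaces A's one-pass state machine with a two-level run-splitting loop (alternative decomposition, same cost).

-- ===== PORT A =====
-- fold state: (fori_group, num_hole, act_diam, diam_count)
def hole_matrix_step (s : List (Int × List (List Int)) × Int × Int × Int)
    (something : Int × Int) : List (Int × List (List Int)) × Int × Int × Int :=
  let (fg, num_hole, act_diam, diam_count) := s
  if num_hole = 0 then
    let act := something.1
    let nh := num_hole + 1
    (fg ++ [(act, [[nh, something.2]])], nh, act, diam_count)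
  else if act_diam = something.1 then
    let nh := num_hole + 1
    -- in-place append at index diam_count; diam_count is a nonnegative running index, so .toNat is exact
    (fg.modify diam_count.toNat (fun e => (e.1, e.2 ++ [[nh, something.2]])), nh, act_diam, diam_count)
  else
    let act := something.1
    let nh := num_hole + 1
    (fg ++ [(act, [[nh, something.2]])], nh, act, diam_count + 1)

def hole_matrix (li : List (Int × Int)) : List (Int × List (List Int)) :=
  (li.foldl hole_matrix_step ([], 0, 0, 0)).1

-- ===== PORT B =====
-- the enumerate-comprehension of Source B: numbered holes of one run, global counter n
def pvNum (g : List (Int × Int)) (n : Int) : List (List Int) :=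
  g.zipIdx.map (fun p => [n + (p.2 : Int) + 1, p.1.2])

def hole_matrix_alt_go (rest : List (Int × Int)) (n : Int) : List (Int × List (List Int)) :=
  match rest with
  | [] => []
  | (d, x0) :: t =>
    let grp := ((d, x0) :: t).takeWhile (fun y => y.1 == d)
    let rest' := ((d, x0) :: t).dropWhile (fun y => y.1 == d)
    (d, pvNum grp n) :: hole_matrix_alt_go rest' (n + (grp.length : Int))
termination_by rest.length
decreasing_by
  simp only [List.takeWhile_cons, List.dropWhile_cons, beq_self_eq_true, if_true]
  have := List.length_dropWhile_le (p := fun y => y.1 == d) (l := t)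
  simp only [List.length_cons]
  omega

def hole_matrix_alt (li : List (Int × Int)) : List (Int × List (List Int)) :=
  hole_matrix_alt_go li 0

-- ===== PRECONDITION & SPEC =====
def Spec_hole_matrix (li : List (Int × Int)) (out : List (Int × List (List Int))) : Prop := out = hole_matrix_alt li
instance (li : List (Int × Int)) (out : List (Int × List (List Int))) : Decidable (Spec_hole_matrix li out) := by unfold Spec_hole_matrix; infer_instance

-- ===== CLAIM (what is proved, stated in full; the proofs are below) =====
def Claim_equal_hole_matrix : Prop := ∀ (li : List (Int × Int)), Dom_hole_matrix li → Spec_hole_matrix li (hole_matrix li)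

-- ===== LEMMAS AND PROOFS =====

-- common characterisation: 'absorb t act hs n' finishes the open group (act, hs) and groups the rest
def pvAbsorb : List (Int × Int) → Int → List (List Int) → Int → List (Int × List (List Int))
  | [], act, hs, _ => [(act, hs)]
  | (d, x) :: t, act, hs, n =>
    if d = act then pvAbsorb t act (hs ++ [[n + 1, x]]) (n + 1)
    else (act, hs) :: pvAbsorb t d [[n + 1, x]] (n + 1)

theorem pvNum_shift (g : List (Int × Int)) (n : Int) (i : Nat) :
    (g.zipIdx (i + 1)).map (fun p => [n + (p.2 : Int) + 1, p.1.2])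
      = (g.zipIdx i).map (fun p => [(n + 1) + (p.2 : Int) + 1, p.1.2]) := by
  induction g generalizing i with
  | nil => simp
  | cons a t ih =>
    simp only [List.zipIdx_cons, List.map_cons, ih]
    congr 2
    push_cast; ring

theorem pvNum_nil (n : Int) : pvNum [] n = [] := rfl

theorem pvNum_cons (d x : Int) (g : List (Int × Int)) (n : Int) :
    pvNum ((d, x) :: g) n = [n + 1, x] :: pvNum g (n + 1) := by
  simp only [pvNum, List.zipIdx_cons, List.map_cons, pvNum_shift]
  norm_num

theorem absorb_eq_go (t : List (Int × Int)) (act : Int) (hs : List (List Int)) (n : Int) :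
    pvAbsorb t act hs n
      = (act, hs ++ pvNum (t.takeWhile (fun y => y.1 == act)) n)
        :: hole_matrix_alt_go (t.dropWhile (fun y => y.1 == act))
            (n + ((t.takeWhile (fun y => y.1 == act)).length : Int)) := by
  induction t generalizing act hs n with
  | nil => simp [pvAbsorb, pvNum_nil, hole_matrix_alt_go]
  | cons a t ih =>
    obtain ⟨d, x⟩ := a
    by_cases h : d = act
    · subst h
      simp only [pvAbsorb, List.takeWhile_cons, List.dropWhile_cons,
        beq_self_eq_true, if_true, pvNum_cons, List.length_cons]
      rw [ih]
      have harr : hs ++ [n + 1, x] :: pvNum (t.takeWhile (fun y => y.1 == d)) (n + 1)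
          = (hs ++ [[n + 1, x]]) ++ pvNum (t.takeWhile (fun y => y.1 == d)) (n + 1) := by
        simp
      rw [harr]
      have hlen : n + ((t.takeWhile (fun y => y.1 == d)).length + 1 : Nat)
          = (n + 1) + ((t.takeWhile (fun y => y.1 == d)).length : Nat) := by
        push_cast; ring
      rw [hlen]
    · have hb : ((d, x).1 == act) = false := by simpa using h
      simp only [pvAbsorb, if_neg h, List.takeWhile_cons, List.dropWhile_cons, hb,
        Bool.false_eq_true, if_false, pvNum_nil, List.append_nil, List.length_nil]
      rw [ih]
      simp only [hole_matrix_alt_go, List.takeWhile_cons, List.dropWhile_cons,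
        beq_self_eq_true, if_true, pvNum_cons, List.length_cons]
      push_cast
      ring_nf
      simp

theorem go_cons (d x : Int) (t : List (Int × Int)) (n : Int) :
    hole_matrix_alt_go ((d, x) :: t) n = pvAbsorb t d [[n + 1, x]] (n + 1) := by
  rw [absorb_eq_go]
  simp only [hole_matrix_alt_go, List.takeWhile_cons, List.dropWhile_cons,
    beq_self_eq_true, if_true, pvNum_cons, List.length_cons, List.singleton_append]
  congr 1
  push_cast; ring

theorem modify_append_singleton {α : Type} (G : List α) (a : α) (f : α → α) :
    (G ++ [a]).modify G.length f = G ++ [f a] := by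
  induction G with
  | nil => simp
  | cons b G ih => simpa [List.modify] using ih

theorem foldl_step_eq (t : List (Int × Int)) (G : List (Int × List (List Int)))
    (act : Int) (hs : List (List Int)) (n : Int) (hn : 1 ≤ n) :
    (t.foldl hole_matrix_step (G ++ [(act, hs)], n, act, (G.length : Int))).1
      = G ++ pvAbsorb t act hs n := by
  induction t generalizing G act hs n with
  | nil => simp [pvAbsorb]
  | cons a t ih =>
    obtain ⟨d, x⟩ := a
    have hn0 : ¬ n = 0 := by omega
    by_cases h : act = d
    · subst h
      simp only [List.foldl_cons, hole_matrix_step, if_neg hn0, if_true,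
        Int.toNat_natCast, modify_append_singleton]
      rw [ih G act (hs ++ [[n + 1, x]]) (n + 1) (by omega)]
      simp [pvAbsorb]
    · simp only [List.foldl_cons, hole_matrix_step, if_neg hn0, if_neg h]
      have hlen : (G.length : Int) + 1 = ((G ++ [(act, hs)]).length : Int) := by
        simp
      rw [hlen, ih (G ++ [(act, hs)]) d [[n + 1, x]] (n + 1) (by omega)]
      have hne : ¬ d = act := fun hh => h hh.symm
      simp [pvAbsorb, if_neg hne]

-- ===== VERDICT (by name: the statement is the Claim_ definition above) =====
theorem hole_matrix_spec : Claim_equal_hole_matrix := by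
  intro li _
  unfold Spec_hole_matrix
  cases li with
  | nil => simp [hole_matrix, hole_matrix_alt, hole_matrix_alt_go]
  | cons a t =>
    obtain ⟨d, x⟩ := a
    show hole_matrix ((d, x) :: t) = hole_matrix_alt ((d, x) :: t)
    unfold hole_matrix hole_matrix_alt
    rw [go_cons]
    simp only [List.foldl_cons, hole_matrix_step]
    have h0 : (0 : Int) = ((List.length ([] : List (Int × List (List Int)))) : Int) := by simp
    calc (List.foldl hole_matrix_step ([(d, [[0 + 1, x]])], 0 + 1, d, 0) t).1
        = (List.foldl hole_matrix_step ([] ++ [(d, [[0 + 1, x]])], 0 + 1, d,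
            ((List.length ([] : List (Int × List (List Int)))) : Int)) t).1 := by norm_num
      _ = [] ++ pvAbsorb t d [[0 + 1, x]] (0 + 1) := foldl_step_eq t [] d [[0 + 1, x]] (0 + 1) (by omega)
      _ = pvAbsorb t d [[0 + 1, x]] (0 + 1) := by simp
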